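-- pv_equiv track=rewrite | github.com/cloudseeder/oap-dev | reference/oap_discovery/oap_discovery/tool_executor.py | _raw_pipe_split
-- ===== SOURCE A (Python) =====
-- def _raw_pipe_split(cmd: str) -> list[str]:
--     """Split a raw command string at unquoted '|' characters.
--
--     Used as a fallback when shlex.split() fails on the full command due to
--     quoting that only makes sense per-stage (e.g. ``cut -d" -f2``).
--     Respects single and double quotes to avoid splitting inside them.
--     """
--     stages: list[str] = []
--     current: list[str] = []
--     in_single = False
--     in_double = False
--     for ch in cmd:
--         if ch == "'" and not in_double:
--             in_single = not in_single
--             current.append(ch)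
--         elif ch == '"' and not in_single:
--             in_double = not in_double
--             current.append(ch)
--         elif ch == "|" and not in_single and not in_double:
--             stages.append("".join(current))
--             current = []
--         else:
--             current.append(ch)
--     if current:
--         stages.append("".join(current))
--     return [s.strip() for s in stages if s.strip()]
-- ===== SOURCE B (Python) =====
-- def _raw_pipe_split(cmd: str) -> list[str]:
--     """Split a raw command string at unquoted '|' characters.
--
--     Recursive decomposition: find the first '|' that is not inside single or
--     double quotes, cut the string there, and repeat on the remainder.  Since a
--     split can only happen when both quote flags are off, each remainder starts
--     in the neutral quote state, so no state is carried across segments.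
--     """
--
--     def next_unquoted_pipe(s: str):
--         in_single = False
--         in_double = False
--         for i, ch in enumerate(s):
--             if ch == "'" and not in_double:
--                 in_single = not in_single
--             elif ch == '"' and not in_single:
--                 in_double = not in_double
--             elif ch == "|" and not in_single and not in_double:
--                 return i
--         return None
--
--     parts: list[str] = []
--     rest = cmd
--     while True:
--         i = next_unquoted_pipe(rest)
--         if i is None:
--             parts.append(rest)
--             break
--         parts.append(rest[:i])
--         rest = rest[i + 1:]
--
--     result: list[str] = []
--     for s in parts:
--         t = s.strip()
--         if t:
--             result.append(t)
--     return result
-- ===== Notes on version B (the rewrite author's own statement) =====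
-- stated objective: alternative
-- what changed: A builds each stage in a character buffer during one stateful scan; B instead repeatedly finds the index of the first unquoted pipe character with a helper and slices the string there, recursing on the remainder (no quote state carried across segments, since a split can only occur in the neutral state), then strips and filters the parts.
import Mathlib
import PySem

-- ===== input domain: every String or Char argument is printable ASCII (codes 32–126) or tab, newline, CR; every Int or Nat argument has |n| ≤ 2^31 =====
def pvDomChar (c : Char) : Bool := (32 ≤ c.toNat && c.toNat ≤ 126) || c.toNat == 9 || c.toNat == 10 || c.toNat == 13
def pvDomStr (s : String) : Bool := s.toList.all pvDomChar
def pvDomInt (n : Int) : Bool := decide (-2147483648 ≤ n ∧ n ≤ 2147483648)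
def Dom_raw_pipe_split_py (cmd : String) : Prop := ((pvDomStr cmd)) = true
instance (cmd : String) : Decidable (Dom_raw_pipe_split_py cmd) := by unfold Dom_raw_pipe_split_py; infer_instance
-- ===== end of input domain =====

-- B replaces A's single stateful buffer-building scan by a recursive decomposition
-- (find the first unquoted '|', slice there, recurse on the remainder); alternative structure, same cost.

-- ===== PORT A =====
-- A's for-loop over state (stages, current, in_single, in_double); "".join(current) = String.ofList current
def rpsGo : List Char → List String → List Char → Bool → Bool → List String × List Char
  | [], stages, current, _, _ => (stages, current)
  | ch :: cs, stages, current, inS, inD =>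
    if ch = '\'' ∧ inD = false then rpsGo cs stages (current ++ [ch]) (!inS) inD
    else if ch = '"' ∧ inS = false then rpsGo cs stages (current ++ [ch]) inS (!inD)
    else if ch = '|' ∧ inS = false ∧ inD = false then rpsGo cs (stages ++ [String.ofList current]) [] inS inD
    else rpsGo cs stages (current ++ [ch]) inS inD

def raw_pipe_split_py (cmd : String) : List String :=
  let r := rpsGo cmd.toList [] [] false false
  let stages := if r.2 = [] then r.1 else r.1 ++ [String.ofList r.2]
  -- [s.strip() for s in stages if s.strip()]
  stages.filterMap (fun s => if PySem.Str.strip s = "" then none else some (PySem.Str.strip s))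

-- ===== PORT B =====
-- helper next_unquoted_pipe: index of the first unquoted '|' (None if absent); +1 per consumed char
def nextPipe : List Char → Bool → Bool → Option Nat
  | [], _, _ => none
  | ch :: cs, inS, inD =>
    if ch = '\'' ∧ inD = false then (nextPipe cs (!inS) inD).map (· + 1)
    else if ch = '"' ∧ inS = false then (nextPipe cs inS (!inD)).map (· + 1)
    else if ch = '|' ∧ inS = false ∧ inD = false then some 0
    else (nextPipe cs inS inD).map (· + 1)

-- needed by bsplit's termination proof
theorem nextPipe_lt_length (cs : List Char) (inS inD : Bool) (i : Nat)
    (h : nextPipe cs inS inD = some i) : i < cs.length := by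
  induction cs generalizing inS inD i with
  | nil => simp [nextPipe] at h
  | cons ch cs ih =>
    simp only [nextPipe] at h
    split_ifs at h <;>
      first
        | (cases h; simp)
        | (rcases Option.map_eq_some_iff.mp h with ⟨j, hj, rfl⟩
           have := ih _ _ _ hj; simp; omega)

-- B's while-loop: rest[:i] = take i, rest[i+1:] = drop (i+1) (i a valid nonnegative index, so exact)
def bsplit (cs : List Char) : List (List Char) :=
  match h : nextPipe cs false false with
  | none => [cs]
  | some i => cs.take i :: bsplit (cs.drop (i + 1))
termination_by cs.length
decreasing_by
  have := nextPipe_lt_length cs false false i h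
  simp; omega

def raw_pipe_split_py_alt (cmd : String) : List String :=
  (bsplit cmd.toList).foldl (fun acc p =>
    if PySem.Str.strip (String.ofList p) = "" then acc
    else acc ++ [PySem.Str.strip (String.ofList p)]) []

-- ===== PRECONDITION & SPEC =====
def Spec_raw_pipe_split_py (cmd : String) (out : List String) : Prop := out = raw_pipe_split_py_alt cmd
instance (cmd : String) (out : List String) : Decidable (Spec_raw_pipe_split_py cmd out) := by unfold Spec_raw_pipe_split_py; infer_instance

-- ===== CLAIM (what is proved, stated in full; the proofs are below) =====
def Claim_equal_raw_pipe_split_py : Prop := ∀ (cmd : String), Dom_raw_pipe_split_py cmd → Spec_raw_pipe_split_py cmd (raw_pipe_split_py cmd)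

-- ===== LEMMAS AND PROOFS =====

theorem bsplit_none (cs : List Char) (h : nextPipe cs false false = none) : bsplit cs = [cs] := by
  rw [bsplit]; split <;> simp_all

theorem bsplit_some (cs : List Char) (i : Nat) (h : nextPipe cs false false = some i) :
    bsplit cs = cs.take i :: bsplit (cs.drop (i + 1)) := by
  rw [bsplit]; split <;> simp_all

theorem bsplit_ne_nil (cs : List Char) : bsplit cs ≠ [] := by
  rw [bsplit]; split <;> simp

-- A's stage list described segment-wise: prefix `cur` joins the first segment; only the
-- final stage is subject to A's "if current:" nonemptiness test.
def aStages : List Char → List (List Char) → List String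
  | _, [] => []
  | cur, [seg] => if cur ++ seg = [] then [] else [String.ofList (cur ++ seg)]
  | cur, seg :: s2 :: rest => String.ofList (cur ++ seg) :: aStages [] (s2 :: rest)

def finalize (r : List String × List Char) : List String :=
  if r.2 = [] then r.1 else r.1 ++ [String.ofList r.2]

theorem rpsGo_no_pipe (cs : List Char) (stages : List String) (current : List Char)
    (inS inD : Bool) (h : nextPipe cs inS inD = none) :
    rpsGo cs stages current inS inD = (stages, current ++ cs) := by
  induction cs generalizing stages current inS inD with
  | nil => simp [rpsGo]
  | cons ch cs ih =>
    simp only [nextPipe] at h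
    simp only [rpsGo]
    split_ifs at h ⊢ <;>
      exact (ih _ _ _ _ (Option.map_eq_none_iff.mp h)).trans (by simp)

theorem rpsGo_pipe (cs : List Char) (stages : List String) (current : List Char)
    (inS inD : Bool) (i : Nat) (h : nextPipe cs inS inD = some i) :
    rpsGo cs stages current inS inD =
      rpsGo (cs.drop (i + 1)) (stages ++ [String.ofList (current ++ cs.take i)]) [] false false := by
  induction cs generalizing stages current inS inD i with
  | nil => simp [nextPipe] at h
  | cons ch cs ih =>
    simp only [nextPipe] at h
    simp only [rpsGo]
    split_ifs at h ⊢ with h1 h2 h3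
    · rcases Option.map_eq_some_iff.mp h with ⟨j, hj, rfl⟩
      rw [ih _ _ _ _ _ hj]; simp
    · rcases Option.map_eq_some_iff.mp h with ⟨j, hj, rfl⟩
      rw [ih _ _ _ _ _ hj]; simp
    · injection h with h0
      obtain ⟨_, hS, hD⟩ := h3
      subst h0 hS hD
      simp
    · rcases Option.map_eq_some_iff.mp h with ⟨j, hj, rfl⟩
      rw [ih _ _ _ _ _ hj]; simp

theorem rpsGo_eq_aStages (cs : List Char) : ∀ (stages : List String) (current : List Char),
    finalize (rpsGo cs stages current false false) = stages ++ aStages current (bsplit cs) := by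
  induction cs using bsplit.induct with
  | case1 cs h =>
    intro stages current
    rw [rpsGo_no_pipe _ _ _ _ _ h, bsplit_none _ h]
    simp only [finalize, aStages]
    split_ifs <;> simp
  | case2 cs i h ih =>
    intro stages current
    rw [rpsGo_pipe _ _ _ _ _ _ h, bsplit_some _ _ h, ih]
    rcases hb : bsplit (cs.drop (i + 1)) with _ | ⟨s2, rest⟩
    · exact absurd hb (bsplit_ne_nil _)
    · simp [aStages]

theorem filterMap_aStages (segs : List (List Char)) :
    (aStages [] segs).filterMap
        (fun s => if PySem.Str.strip s = "" then none else some (PySem.Str.strip s)) =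
      segs.filterMap
        (fun p => if PySem.Str.strip (String.ofList p) = "" then none
                  else some (PySem.Str.strip (String.ofList p))) := by
  induction segs with
  | nil => simp [aStages]
  | cons seg rest ih =>
    cases rest with
    | nil =>
      simp only [aStages, List.nil_append]
      split_ifs with h1
      · subst h1; decide
      · simp only [List.filterMap_cons, List.filterMap_nil]
    | cons s2 rest2 =>
      simp only [aStages, List.nil_append, List.filterMap_cons]
      rw [ih]; rfl

theorem foldl_eq_filterMap (segs : List (List Char)) (acc : List String) :
    segs.foldl (fun acc p =>
        if PySem.Str.strip (String.ofList p) = "" then acc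
        else acc ++ [PySem.Str.strip (String.ofList p)]) acc =
      acc ++ segs.filterMap
        (fun p => if PySem.Str.strip (String.ofList p) = "" then none
                  else some (PySem.Str.strip (String.ofList p))) := by
  induction segs generalizing acc with
  | nil => simp
  | cons p rest ih => simp only [List.foldl_cons, List.filterMap_cons]; split <;> simp [ih]

-- ===== VERDICT (by name: the statement is the Claim_ definition above) =====
theorem raw_pipe_split_py_spec : Claim_equal_raw_pipe_split_py := by
  intro cmd _
  unfold Spec_raw_pipe_split_py raw_pipe_split_py raw_pipe_split_py_alt
  rw [foldl_eq_filterMap, List.nil_append, ← filterMap_aStages]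
  have h := rpsGo_eq_aStages cmd.toList [] []
  simp only [finalize, List.nil_append] at h
  exact congrArg (List.filterMap _) h
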